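-- pv_equiv track=rewrite | github.com/SughoshDixit/sughosh-ai-blog | backend/app.py | find_information
-- ===== SOURCE A (Python) =====
-- personal_info = {
--   "name": "Sughosh Dixit",
--   "occupation": "Data Scientist",
--   "skills": [
--     "Data Science",
--     "Web Development",
--     "Product Development",
--     "Competitive Programming",
--     "Python",
--     "JavaScript",
--     "React"
--   ],
--   "interests": [
--     "Football",
--     "Astronomy",
--     "Bharat's History",
--     "Music"
--   ],
--   "achievements": [
--     "Rakathon 2.0 (2019): Selected in top 15 most promising ideas.",
--     "Garage48 Covid19 Hackathon (2020): Built an app called QuarantineForSure.",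
--     "PANIIT Hackathon IISC (2021): Selected in top 20 promising ideas, worked on Early Age Education and Talents prediction application (Project Alphers).",
--     "Karnataka State Police Hackathon (2023): Finalists, built a Flask-based Face recognition application for Criminals using Image Data Augmentation and GAN.",
--     "FFI Scale91 Fintech Hackathon (2024): Working on a Fintech solution for Algorithmic trading using Zerodha's KiteConnect API."
--   ],
--   "education": "Data Science professional with background in technology and innovation",
--   "location": "India",
--   "philosophy": "Civilizationalist by ideology, believing in understanding our collective past to shape a better future."
-- }
--
-- def find_information(query):
--     query = query.lower()
--
--     # Check if asking about name
--     if "name" in query or "who are you" in query or "who is" in query: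
--         return f"My name is {personal_info['name']}, and I'm a {personal_info['occupation']}."
--
--     # Check if asking about job
--     if any(word in query for word in ["job", "work", "occupation", "profession"]):
--         return f"I work as a {personal_info['occupation']}."
--
--     # Check if asking about skills or what I can do
--     if any(word in query for word in ["skill", "can you", "good at", "expertise"]):
--         return f"I have skills in {', '.join(personal_info['skills'])}."
--
--     # Check if asking about interests or hobbies
--     if any(word in query for word in ["interest", "hobby", "like to", "enjoy"]):
--         return f"I'm interested in {', '.join(personal_info['interests'])}."
--
--     # Check if asking about achievements or accomplishments
--     if any(word in query for word in ["achievement", "accomplish", "award", "hackathon", "project"]):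
--         return f"Some of my notable achievements include: \n- {chr(10).join(['- ' + a for a in personal_info['achievements']])}"
--
--     # Check if asking about education
--     if any(word in query for word in ["education", "study", "school", "college", "university"]):
--         return f"I'm a {personal_info['education']}."
--
--     # Check if asking about location
--     if any(word in query for word in ["location", "where", "country", "city", "live"]):
--         return f"I'm based in {personal_info['location']}."
--
--     # Check if asking about philosophy or ideology
--     if any(word in query for word in ["philosophy", "believe", "ideology", "values"]):
--         return personal_info["philosophy"]
--
--     # Generic greeting response
--     if any(word in query for word in ["hello", "hi", "hey"]):
--         return f"Hello! I'm {personal_info['name']}, a {personal_info['occupation']}. How can I help you today?"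
--
--     # Generic response for unrecognized queries
--     return f"I'm {personal_info['name']}, a {personal_info['occupation']} with interests in {', '.join(personal_info['interests'])}. Is there something specific about me you'd like to know?"
-- ===== SOURCE B (Python) =====
-- personal_info = {
--   "name": "Sughosh Dixit",
--   "occupation": "Data Scientist",
--   "skills": [
--     "Data Science",
--     "Web Development",
--     "Product Development",
--     "Competitive Programming",
--     "Python",
--     "JavaScript",
--     "React"
--   ],
--   "interests": [
--     "Football",
--     "Astronomy",
--     "Bharat's History",
--     "Music"
--   ],
--   "achievements": [
--     "Rakathon 2.0 (2019): Selected in top 15 most promising ideas.",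
--     "Garage48 Covid19 Hackathon (2020): Built an app called QuarantineForSure.",
--     "PANIIT Hackathon IISC (2021): Selected in top 20 promising ideas, worked on Early Age Education and Talents prediction application (Project Alphers).",
--     "Karnataka State Police Hackathon (2023): Finalists, built a Flask-based Face recognition application for Criminals using Image Data Augmentation and GAN.",
--     "FFI Scale91 Fintech Hackathon (2024): Working on a Fintech solution for Algorithmic trading using Zerodha's KiteConnect API."
--   ],
--   "education": "Data Science professional with background in technology and innovation",
--   "location": "India",
--   "philosophy": "Civilizationalist by ideology, believing in understanding our collective past to shape a better future."
-- }
--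
-- # Flat inverted keyword index: each keyword maps to the index of its answer
-- # category.  Instead of first-match control flow, we aggregate the MINIMUM
-- # matching category index over all keywords (no early return), then index
-- # into the answer table; the last answer (index 9) is the fallback.
-- _KEYWORDS = [
--     ("name", 0), ("who are you", 0), ("who is", 0),
--     ("job", 1), ("work", 1), ("occupation", 1), ("profession", 1),
--     ("skill", 2), ("can you", 2), ("good at", 2), ("expertise", 2),
--     ("interest", 3), ("hobby", 3), ("like to", 3), ("enjoy", 3),
--     ("achievement", 4), ("accomplish", 4), ("award", 4), ("hackathon", 4), ("project", 4),
--     ("education", 5), ("study", 5), ("school", 5), ("college", 5), ("university", 5),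
--     ("location", 6), ("where", 6), ("country", 6), ("city", 6), ("live", 6),
--     ("philosophy", 7), ("believe", 7), ("ideology", 7), ("values", 7),
--     ("hello", 8), ("hi", 8), ("hey", 8),
-- ]
--
-- _ANSWERS = [
--     f"My name is {personal_info['name']}, and I'm a {personal_info['occupation']}.",
--     f"I work as a {personal_info['occupation']}.",
--     f"I have skills in {', '.join(personal_info['skills'])}.",
--     f"I'm interested in {', '.join(personal_info['interests'])}.",
--     f"Some of my notable achievements include: \n- {chr(10).join(['- ' + a for a in personal_info['achievements']])}",
--     f"I'm a {personal_info['education']}.",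
--     f"I'm based in {personal_info['location']}.",
--     personal_info["philosophy"],
--     f"Hello! I'm {personal_info['name']}, a {personal_info['occupation']}. How can I help you today?",
--     f"I'm {personal_info['name']}, a {personal_info['occupation']} with interests in {', '.join(personal_info['interests'])}. Is there something specific about me you'd like to know?",
-- ]
--
-- def find_information(query):
--     q = query.lower()
--     idx = len(_ANSWERS) - 1
--     for w, i in _KEYWORDS:
--         if w in q:
--             idx = min(idx, i)
--     return _ANSWERS[idx]
-- ===== Notes on version B (the rewrite author's own statement) =====
-- stated objective: alternative
-- what changed: Replaces A's first-match if-chain by an inverted flat keyword->category index: a single aggregation pass computes the minimum matching category index over all keywords (no early return, no per-branch control flow), then indexes into an answer table whose last entry is the fallback; correct because the first branch A takes is exactly the minimal-index matching category.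
import Mathlib
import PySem

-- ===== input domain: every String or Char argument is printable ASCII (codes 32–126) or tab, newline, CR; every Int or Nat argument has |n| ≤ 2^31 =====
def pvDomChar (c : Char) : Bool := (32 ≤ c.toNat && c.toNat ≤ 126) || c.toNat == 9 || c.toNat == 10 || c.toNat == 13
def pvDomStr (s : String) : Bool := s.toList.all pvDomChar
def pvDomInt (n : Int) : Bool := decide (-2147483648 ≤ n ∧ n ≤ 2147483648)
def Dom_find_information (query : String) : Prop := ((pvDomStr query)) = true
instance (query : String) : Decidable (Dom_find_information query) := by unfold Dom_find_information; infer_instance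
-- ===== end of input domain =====

-- B replaces A's first-match if-chain by a min-aggregation over a flat inverted keyword index plus a table lookup (alternative decomposition, same cost).

-- ===== PORT A =====
-- response strings written out as the literals the f-strings over personal_info produce
def find_information (query : String) : String :=
  let q := PySem.Str.lower query
  if PySem.Str.isIn "name" q || PySem.Str.isIn "who are you" q || PySem.Str.isIn "who is" q then
    "My name is Sughosh Dixit, and I'm a Data Scientist."
  else if ["job", "work", "occupation", "profession"].any (fun w => PySem.Str.isIn w q) then
    "I work as a Data Scientist."
  else if ["skill", "can you", "good at", "expertise"].any (fun w => PySem.Str.isIn w q) then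
    "I have skills in Data Science, Web Development, Product Development, Competitive Programming, Python, JavaScript, React."
  else if ["interest", "hobby", "like to", "enjoy"].any (fun w => PySem.Str.isIn w q) then
    "I'm interested in Football, Astronomy, Bharat's History, Music."
  else if ["achievement", "accomplish", "award", "hackathon", "project"].any (fun w => PySem.Str.isIn w q) then
    "Some of my notable achievements include: \n- - Rakathon 2.0 (2019): Selected in top 15 most promising ideas.\n- Garage48 Covid19 Hackathon (2020): Built an app called QuarantineForSure.\n- PANIIT Hackathon IISC (2021): Selected in top 20 promising ideas, worked on Early Age Education and Talents prediction application (Project Alphers).\n- Karnataka State Police Hackathon (2023): Finalists, built a Flask-based Face recognition application for Criminals using Image Data Augmentation and GAN.\n- FFI Scale91 Fintech Hackathon (2024): Working on a Fintech solution for Algorithmic trading using Zerodha's KiteConnect API."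
  else if ["education", "study", "school", "college", "university"].any (fun w => PySem.Str.isIn w q) then
    "I'm a Data Science professional with background in technology and innovation."
  else if ["location", "where", "country", "city", "live"].any (fun w => PySem.Str.isIn w q) then
    "I'm based in India."
  else if ["philosophy", "believe", "ideology", "values"].any (fun w => PySem.Str.isIn w q) then
    "Civilizationalist by ideology, believing in understanding our collective past to shape a better future."
  else if ["hello", "hi", "hey"].any (fun w => PySem.Str.isIn w q) then
    "Hello! I'm Sughosh Dixit, a Data Scientist. How can I help you today?"
  else
    "I'm Sughosh Dixit, a Data Scientist with interests in Football, Astronomy, Bharat's History, Music. Is there something specific about me you'd like to know?"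

-- ===== PORT B =====
-- Source B's flat inverted keyword index: keyword → category index
def pvKeywords : List (String × Nat) :=
  [ ("name", 0), ("who are you", 0), ("who is", 0),
    ("job", 1), ("work", 1), ("occupation", 1), ("profession", 1),
    ("skill", 2), ("can you", 2), ("good at", 2), ("expertise", 2),
    ("interest", 3), ("hobby", 3), ("like to", 3), ("enjoy", 3),
    ("achievement", 4), ("accomplish", 4), ("award", 4), ("hackathon", 4), ("project", 4),
    ("education", 5), ("study", 5), ("school", 5), ("college", 5), ("university", 5),
    ("location", 6), ("where", 6), ("country", 6), ("city", 6), ("live", 6),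
    ("philosophy", 7), ("believe", 7), ("ideology", 7), ("values", 7),
    ("hello", 8), ("hi", 8), ("hey", 8) ]

-- Source B's answer table; the last entry (index 9) is the fallback
def pvAnswers : List String :=
  [ "My name is Sughosh Dixit, and I'm a Data Scientist.",
    "I work as a Data Scientist.",
    "I have skills in Data Science, Web Development, Product Development, Competitive Programming, Python, JavaScript, React.",
    "I'm interested in Football, Astronomy, Bharat's History, Music.",
    "Some of my notable achievements include: \n- - Rakathon 2.0 (2019): Selected in top 15 most promising ideas.\n- Garage48 Covid19 Hackathon (2020): Built an app called QuarantineForSure.\n- PANIIT Hackathon IISC (2021): Selected in top 20 promising ideas, worked on Early Age Education and Talents prediction application (Project Alphers).\n- Karnataka State Police Hackathon (2023): Finalists, built a Flask-based Face recognition application for Criminals using Image Data Augmentation and GAN.\n- FFI Scale91 Fintech Hackathon (2024): Working on a Fintech solution for Algorithmic trading using Zerodha's KiteConnect API.",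
    "I'm a Data Science professional with background in technology and innovation.",
    "I'm based in India.",
    "Civilizationalist by ideology, believing in understanding our collective past to shape a better future.",
    "Hello! I'm Sughosh Dixit, a Data Scientist. How can I help you today?",
    "I'm Sughosh Dixit, a Data Scientist with interests in Football, Astronomy, Bharat's History, Music. Is there something specific about me you'd like to know?" ]

-- Source B's loop: idx starts at 9 (= len(_ANSWERS)-1) and is min-folded over matching keywords;
-- _ANSWERS[idx] with idx always in range 0..9 is ported as getD (exact here since idx ≤ 9)
def find_information_alt (query : String) : String :=
  let q := PySem.Str.lower query
  let idx := pvKeywords.foldl (fun a p => if PySem.Str.isIn p.1 q then min a p.2 else a) (pvAnswers.length - 1)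
  pvAnswers.getD idx ""

-- ===== PRECONDITION & SPEC =====
def Spec_find_information (query : String) (out : String) : Prop := out = find_information_alt query
instance (query : String) (out : String) : Decidable (Spec_find_information query out) := by unfold Spec_find_information; infer_instance

-- ===== CLAIM (what is proved, stated in full; the proofs are below) =====
def Claim_equal_find_information : Prop := ∀ (query : String), Dom_find_information query → Spec_find_information query (find_information query)

-- ===== LEMMAS AND PROOFS =====

-- folding the min-accumulator over a constant-index group equals one any-test
theorem pv_fold_group (q : String) (i : Nat) (ws : List String) (acc : Nat) :
    List.foldl (fun a (p : String × Nat) => if PySem.Str.isIn p.1 q then min a p.2 else a) acc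
      (ws.map (fun w => (w, i)))
    = if ws.any (fun w => PySem.Str.isIn w q) then min acc i else acc := by
  induction ws generalizing acc with
  | nil => simp
  | cons w ws ih =>
      simp only [List.map_cons, List.foldl_cons, List.any_cons]
      by_cases h : PySem.Str.isIn w q = true
      · rw [if_pos h, ih]
        simp at h
        simp [h]
      · have hf : PySem.Str.isIn w q = false := by
          revert h; cases PySem.Str.isIn w q <;> simp
        rw [if_neg h, ih]
        simp at hf
        simp [hf]

-- the flat index is the concatenation of the nine constant-index groups
theorem pv_keywords_split :
    pvKeywords =
      (["name", "who are you", "who is"].map (fun w => (w, 0)))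
      ++ (["job", "work", "occupation", "profession"].map (fun w => (w, 1)))
      ++ (["skill", "can you", "good at", "expertise"].map (fun w => (w, 2)))
      ++ (["interest", "hobby", "like to", "enjoy"].map (fun w => (w, 3)))
      ++ (["achievement", "accomplish", "award", "hackathon", "project"].map (fun w => (w, 4)))
      ++ (["education", "study", "school", "college", "university"].map (fun w => (w, 5)))
      ++ (["location", "where", "country", "city", "live"].map (fun w => (w, 6)))
      ++ (["philosophy", "believe", "ideology", "values"].map (fun w => (w, 7)))
      ++ (["hello", "hi", "hey"].map (fun w => (w, 8))) := by
  rfl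

-- ===== VERDICT (by name: the statement is the Claim_ definition above) =====
theorem find_information_spec : Claim_equal_find_information := by
  intro query _
  unfold Spec_find_information find_information find_information_alt
  rw [pv_keywords_split]
  simp only [List.foldl_append, pv_fold_group, List.any_cons, List.any_nil, Bool.or_false,
    Bool.or_assoc, show pvAnswers.length - 1 = 9 from rfl]
  generalize (PySem.Str.isIn "name" (PySem.Str.lower query) || (PySem.Str.isIn "who are you" (PySem.Str.lower query) || PySem.Str.isIn "who is" (PySem.Str.lower query))) = b0
  generalize (PySem.Str.isIn "job" (PySem.Str.lower query) || (PySem.Str.isIn "work" (PySem.Str.lower query) || (PySem.Str.isIn "occupation" (PySem.Str.lower query) || PySem.Str.isIn "profession" (PySem.Str.lower query)))) = b1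
  generalize (PySem.Str.isIn "skill" (PySem.Str.lower query) || (PySem.Str.isIn "can you" (PySem.Str.lower query) || (PySem.Str.isIn "good at" (PySem.Str.lower query) || PySem.Str.isIn "expertise" (PySem.Str.lower query)))) = b2
  generalize (PySem.Str.isIn "interest" (PySem.Str.lower query) || (PySem.Str.isIn "hobby" (PySem.Str.lower query) || (PySem.Str.isIn "like to" (PySem.Str.lower query) || PySem.Str.isIn "enjoy" (PySem.Str.lower query)))) = b3
  generalize (PySem.Str.isIn "achievement" (PySem.Str.lower query) || (PySem.Str.isIn "accomplish" (PySem.Str.lower query) || (PySem.Str.isIn "award" (PySem.Str.lower query) || (PySem.Str.isIn "hackathon" (PySem.Str.lower query) || PySem.Str.isIn "project" (PySem.Str.lower query))))) = b4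
  generalize (PySem.Str.isIn "education" (PySem.Str.lower query) || (PySem.Str.isIn "study" (PySem.Str.lower query) || (PySem.Str.isIn "school" (PySem.Str.lower query) || (PySem.Str.isIn "college" (PySem.Str.lower query) || PySem.Str.isIn "university" (PySem.Str.lower query))))) = b5
  generalize (PySem.Str.isIn "location" (PySem.Str.lower query) || (PySem.Str.isIn "where" (PySem.Str.lower query) || (PySem.Str.isIn "country" (PySem.Str.lower query) || (PySem.Str.isIn "city" (PySem.Str.lower query) || PySem.Str.isIn "live" (PySem.Str.lower query))))) = b6
  generalize (PySem.Str.isIn "philosophy" (PySem.Str.lower query) || (PySem.Str.isIn "believe" (PySem.Str.lower query) || (PySem.Str.isIn "ideology" (PySem.Str.lower query) || PySem.Str.isIn "values" (PySem.Str.lower query)))) = b7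
  generalize (PySem.Str.isIn "hello" (PySem.Str.lower query) || (PySem.Str.isIn "hi" (PySem.Str.lower query) || PySem.Str.isIn "hey" (PySem.Str.lower query))) = b8
  cases b0 <;> cases b1 <;> cases b2 <;> cases b3 <;> cases b4 <;> cases b5 <;> cases b6 <;> cases b7 <;> cases b8 <;> rfl
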